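-- pv_equiv track=rewrite | github.com/sinistergeek/Python-Data-Structures-and-Algorithms | Partial_Insertion_Sort.py | perform_partial_sort
-- ===== SOURCE A (Python) =====
-- def perform_partial_sort(lst,n):
--     for i in range(1,n):
--         key = lst[i]
--         j = i -1
--         while j>=0 and key < lst[j]:
--             lst[j+1] =lst[j]
--             j = j - 1
--
--         lst[j + 1] = key
--     return lst[:n]
-- ===== SOURCE B (Python) =====
-- # B: sorted() on the n-prefix slice instead of in-place insertion sort.
-- # Note: A mutates lst in place (sorts its first n elements); B does not mutate.
-- def perform_partial_sort(lst, n):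
--     return sorted(lst[:n])
-- ===== Notes on version B (the rewrite author's own statement) =====
-- stated objective: faster
-- what changed: Replaces the in-place O(n^2) insertion sort of the first n elements by a single call sorted(lst[:n]) (Timsort, O(n log n)); B also does not mutate lst.
-- intended difference: For negative n (where lst[:n] is not already sorted) A's loop range(1,n) is empty so A returns the slice lst[:n] unsorted, while B returns sorted(lst[:n]); sorting the returned prefix is the function's stated purpose, so B's value is the intended one. — e.g. on perform_partial_sort([2, 1, 3], -1): A returns [2, 1], B returns [1, 2]
import Mathlib
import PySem

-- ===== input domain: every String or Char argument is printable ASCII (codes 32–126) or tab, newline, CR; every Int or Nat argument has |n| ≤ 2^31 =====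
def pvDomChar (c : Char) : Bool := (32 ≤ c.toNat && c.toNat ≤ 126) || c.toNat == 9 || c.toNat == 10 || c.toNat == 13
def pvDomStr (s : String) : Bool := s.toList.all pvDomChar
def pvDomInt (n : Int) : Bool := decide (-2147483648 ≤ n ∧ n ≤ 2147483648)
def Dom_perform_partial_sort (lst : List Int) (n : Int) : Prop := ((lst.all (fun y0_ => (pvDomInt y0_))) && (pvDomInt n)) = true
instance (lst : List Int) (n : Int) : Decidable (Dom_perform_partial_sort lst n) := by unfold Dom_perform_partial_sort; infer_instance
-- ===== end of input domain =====

-- B replaces A's in-place insertion sort of the first n elements by one sort of the slice;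
-- A mutates lst in place, B does not: the equivalence proved here is about the RETURN value.

-- ===== PORT A =====
-- the inner 'while j>=0 and key < lst[j]' loop; fuel (j+1).toNat is exactly the number of
-- iterations possible before j goes negative, so the guard is faithful; lst[j] is read via
-- pyGetD (under Pre_ every index read is in range, so the default is never produced).
def pssWhile (key : Int) : Nat → List Int → Int → List Int × Int
  | 0, l, j => (l, j)
  | fuel + 1, l, j =>
    if j ≥ 0 ∧ key < PySem.List.pyGetD l j 0 then
      pssWhile key fuel (l.set (j + 1).toNat (PySem.List.pyGetD l j 0)) (j - 1)
    else (l, j)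

-- one iteration of the 'for i in range(1,n)' body
def pssStep (l : List Int) (i : Int) : List Int :=
  let key := PySem.List.pyGetD l i 0
  let j : Int := i - 1
  let r := pssWhile key (j + 1).toNat l j
  r.1.set (r.2 + 1).toNat key

def perform_partial_sort (lst : List Int) (n : Int) : List Int :=
  PySem.List.slice ((PySem.List.pyRange 1 n 1).foldl pssStep lst) none (some n)

-- ===== PORT B =====
def perform_partial_sort_alt (lst : List Int) (n : Int) : List Int :=
  PySem.List.sorted (PySem.List.slice lst none (some n)) (fun x => x) false

-- ===== PRECONDITION & SPEC =====
-- A raises IndexError reading lst[i] exactly when n ≥ 2 and n > len(lst); those inputs are excluded.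
def Pre_perform_partial_sort (lst : List Int) (n : Int) : Prop :=
  n ≤ (lst.length : Int) ∨ n ≤ 1
instance (lst : List Int) (n : Int) : Decidable (Pre_perform_partial_sort lst n) := by
  unfold Pre_perform_partial_sort; infer_instance
def pvWitness_perform_partial_sort : List Int × Int := ([5, 2, 9, 1], 3)

-- For negative n with lst[:n] not already sorted, A returns the slice lst[:n] unsorted (its loop
-- range(1,n) is empty) while B returns sorted(lst[:n]); the sorted prefix is the intended value.
def D_perform_partial_sort (lst : List Int) (n : Int) : Prop :=
  n < 0 ∧ ¬ (lst.take (lst.length - (-n).toNat)).Pairwise (· ≤ ·)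
instance (lst : List Int) (n : Int) : Decidable (D_perform_partial_sort lst n) := by
  unfold D_perform_partial_sort; infer_instance

def Spec_perform_partial_sort (lst : List Int) (n : Int) (out : List Int) : Prop :=
  ¬ D_perform_partial_sort lst n → out = perform_partial_sort_alt lst n
instance (lst : List Int) (n : Int) (out : List Int) : Decidable (Spec_perform_partial_sort lst n out) := by
  unfold Spec_perform_partial_sort; infer_instance

def pvDiffWitness_perform_partial_sort : List Int × Int := ([2, 1, 3], -1)
def pvDiffWitnessOut_perform_partial_sort : (List Int) × (List Int) := ([2, 1], [1, 2])

-- ===== CLAIM (what is proved, stated in full; the proofs are below) =====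
def Claim_unchanged_perform_partial_sort : Prop := ∀ (lst : List Int) (n : Int), Dom_perform_partial_sort lst n → Pre_perform_partial_sort lst n → Spec_perform_partial_sort lst n (perform_partial_sort lst n)
def Claim_changed_perform_partial_sort : Prop := Dom_perform_partial_sort (pvDiffWitness_perform_partial_sort.1) (pvDiffWitness_perform_partial_sort.2) ∧ Pre_perform_partial_sort (pvDiffWitness_perform_partial_sort.1) (pvDiffWitness_perform_partial_sort.2) ∧ D_perform_partial_sort (pvDiffWitness_perform_partial_sort.1) (pvDiffWitness_perform_partial_sort.2) ∧ perform_partial_sort (pvDiffWitness_perform_partial_sort.1) (pvDiffWitness_perform_partial_sort.2) = pvDiffWitnessOut_perform_partial_sort.1 ∧ perform_partial_sort_alt (pvDiffWitness_perform_partial_sort.1) (pvDiffWitness_perform_partial_sort.2) = pvDiffWitnessOut_perform_partial_sort.2 ∧ pvDiffWitnessOut_perform_partial_sort.1 ≠ pvDiffWitnessOut_perform_partial_sort.2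
def Claim_exact_perform_partial_sort : Prop := ∀ (lst : List Int) (n : Int), Dom_perform_partial_sort lst n → Pre_perform_partial_sort lst n → D_perform_partial_sort lst n → perform_partial_sort lst n ≠ perform_partial_sort_alt lst n

-- ===== LEMMAS AND PROOFS =====

-- proof-side model of one insertion step: insert key into p scanning from the right
-- (pyInsRev works on the reversed prefix)
def pyInsRev (key : Int) : List Int → List Int
  | [] => [key]
  | a :: as => if key < a then a :: pyInsRev key as else key :: a :: as

def pyIns (key : Int) (p : List Int) : List Int := (pyInsRev key p.reverse).reverse

theorem mem_pyInsRev (key x : Int) (l : List Int) :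
    x ∈ pyInsRev key l ↔ x = key ∨ x ∈ l := by
  induction l with
  | nil => simp [pyInsRev]
  | cons a as ih =>
    simp only [pyInsRev]
    split_ifs
    · simp [ih]
      tauto
    · simp

theorem pyInsRev_perm (key : Int) (l : List Int) : (pyInsRev key l).Perm (key :: l) := by
  induction l with
  | nil => simp [pyInsRev]
  | cons a as ih =>
    simp only [pyInsRev]
    split_ifs
    · exact ((ih.cons a).trans (List.Perm.swap key a as))
    · exact List.Perm.refl _

theorem pyIns_perm (key : Int) (p : List Int) : (pyIns key p).Perm (key :: p) :=
  ((List.reverse_perm _).trans (pyInsRev_perm key p.reverse)).trans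
    (List.Perm.cons key (List.reverse_perm p))

theorem length_pyInsRev (key : Int) (l : List Int) :
    (pyInsRev key l).length = l.length + 1 := by
  induction l with
  | nil => simp [pyInsRev]
  | cons a as ih =>
    simp only [pyInsRev]
    split_ifs <;> simp [ih]

theorem length_pyIns (key : Int) (p : List Int) : (pyIns key p).length = p.length + 1 := by
  simp [pyIns, length_pyInsRev]

theorem pyInsRev_pairwise (key : Int) (l : List Int)
    (h : l.Pairwise (fun a b => b ≤ a)) : (pyInsRev key l).Pairwise (fun a b => b ≤ a) := by
  induction l with
  | nil => simp [pyInsRev]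
  | cons a as ih =>
    rcases List.pairwise_cons.mp h with ⟨ha, has⟩
    simp only [pyInsRev]
    split_ifs with hk
    · refine List.pairwise_cons.mpr ⟨?_, ih has⟩
      intro x hx
      rcases (mem_pyInsRev key x as).mp hx with rfl | hx
      · exact le_of_lt hk
      · exact ha x hx
    · refine List.pairwise_cons.mpr ⟨?_, h⟩
      intro x hx
      rcases List.mem_cons.mp hx with rfl | hx
      · omega
      · exact le_trans (ha x hx) (by omega)

theorem pyIns_pairwise (key : Int) (p : List Int)
    (h : p.Pairwise (· ≤ ·)) : (pyIns key p).Pairwise (· ≤ ·) := by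
  unfold pyIns
  rw [List.pairwise_reverse]
  exact pyInsRev_pairwise key p.reverse (by rwa [List.pairwise_reverse])

theorem set_append_len_add (p q : List Int) (k : Nat) (v : Int) :
    (p ++ q).set (p.length + k) v = p ++ q.set k v := by
  induction p with
  | nil => simp
  | cons a p ih => simp [Nat.succ_add, ih]

theorem pyGetD_append_mid (p t : List Int) (y : Int) :
    PySem.List.pyGetD (p ++ y :: t) (p.length : Int) 0 = y := by
  rw [PySem.List.pyGetD_natCast]
  induction p with
  | nil => simp
  | cons a p ih => simpa [List.getD] using ih

-- the inner while loop followed by the final write 'lst[j+1] = key' inserts key into the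
-- prefix p, overwriting the scratch cell x
theorem pssWhile_insert (p : List Int) : ∀ (x key : Int) (rest : List Int),
    ((pssWhile key p.length (p ++ x :: rest) ((p.length : Int) - 1)).1).set
      (((pssWhile key p.length (p ++ x :: rest) ((p.length : Int) - 1)).2) + 1).toNat key
    = pyIns key p ++ rest := by
  induction p using List.reverseRecOn with
  | nil =>
    intro x key rest
    simp [pssWhile, pyIns, pyInsRev]
  | append_singleton p' a ih =>
    intro x key rest
    have hlen : (p' ++ [a]).length = p'.length + 1 := by simp
    have hl : (p' ++ [a]) ++ x :: rest = p' ++ a :: (x :: rest) := by simp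
    rw [hlen, hl]
    rw [show ((p'.length + 1 : Nat) : Int) - 1 = (p'.length : Int) by push_cast; ring]
    simp only [pssWhile]
    rw [pyGetD_append_mid p' (x :: rest) a]
    by_cases hk : key < a
    · rw [if_pos ⟨Int.natCast_nonneg _, hk⟩]
      have hset : (p' ++ a :: x :: rest).set ((p'.length : Int) + 1).toNat a
          = p' ++ a :: (a :: rest) := by
        rw [show ((p'.length : Int) + 1).toNat = p'.length + 1 by omega, ← hl,
            show p'.length + 1 = (p' ++ [a]).length + 0 by simp,
            set_append_len_add]
        simp
      rw [hset]
      have := ih a key (a :: rest)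
      rw [this]
      simp [pyIns, pyInsRev, hk]
    · rw [if_neg (by intro h; exact hk h.2)]
      rw [show ((p'.length : Int) + 1).toNat = p'.length + 1 by omega, ← hl,
          show p'.length + 1 = (p' ++ [a]).length + 0 by simp,
          set_append_len_add]
      simp [pyIns, pyInsRev, hk]

-- the for-loop fold consumes k elements after the prefix P, inserting each into the prefix
theorem foldl_pssStep (k : Nat) : ∀ (P rest : List Int), k ≤ rest.length →
    (PySem.List.pyRange (P.length : Int) ((P.length : Int) + k) 1).foldl pssStep (P ++ rest)
      = (rest.take k).foldl (fun p v => pyIns v p) P ++ rest.drop k := by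
  induction k with
  | zero =>
    intro P rest _
    rw [PySem.List.pyRange_one_eq_nil (by omega)]
    simp
  | succ k ih =>
    intro P rest hk
    match rest, hk with
    | x :: rest', hk =>
      rw [PySem.List.pyRange_one_cons (by omega)]
      simp only [List.foldl_cons]
      have hstep : pssStep (P ++ x :: rest') (P.length : Int) = pyIns x P ++ rest' := by
        unfold pssStep
        dsimp only
        rw [pyGetD_append_mid P rest' x]
        rw [show ((P.length : Int) - 1 + 1).toNat = P.length by omega]
        exact pssWhile_insert P x x rest'
      rw [hstep]
      have hlen : ((pyIns x P).length : Int) = (P.length : Int) + 1 := by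
        rw [length_pyIns]; push_cast; ring
      have hrange : (P.length : Int) + 1 = ((pyIns x P).length : Int) := hlen.symm
      have hend : (P.length : Int) + (k + 1 : Nat) = ((pyIns x P).length : Int) + k := by
        rw [length_pyIns]; push_cast; ring
      rw [hend, hrange]
      have := ih (pyIns x P) rest' (by simpa using Nat.lt_succ_iff.mp (Nat.lt_of_lt_of_le (Nat.lt_succ_of_le (le_refl k)) hk))
      rw [this]
      simp

theorem foldl_pyIns_perm (xs : List Int) : ∀ (P : List Int),
    (xs.foldl (fun p v => pyIns v p) P).Perm (P ++ xs) := by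
  induction xs with
  | nil => simp
  | cons x xs ih =>
    intro P
    simp only [List.foldl_cons]
    refine (ih (pyIns x P)).trans ?_
    refine (List.Perm.append_right xs (pyIns_perm x P)).trans ?_
    exact (List.perm_middle).symm

theorem foldl_pyIns_pairwise (xs : List Int) : ∀ (P : List Int),
    P.Pairwise (· ≤ ·) → (xs.foldl (fun p v => pyIns v p) P).Pairwise (· ≤ ·) := by
  induction xs with
  | nil => intro P h; simpa using h
  | cons x xs ih =>
    intro P h
    exact ih _ (pyIns_pairwise x P h)

theorem length_foldl_pyIns (xs : List Int) : ∀ (P : List Int),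
    (xs.foldl (fun p v => pyIns v p) P).length = P.length + xs.length := by
  induction xs with
  | nil => simp
  | cons x xs ih =>
    intro P
    simp only [List.foldl_cons]
    rw [ih, length_pyIns]
    simp; omega

theorem pairwise_of_short (l : List Int) (h : l.length ≤ 1) : l.Pairwise (· ≤ ·) := by
  cases l with
  | nil => simp
  | cons a t =>
    cases t with
    | nil => simp
    | cons b u => simp at h

-- ===== VERDICT (by name: the statement is the Claim_ definition above) =====
theorem perform_partial_sort_spec : Claim_unchanged_perform_partial_sort := by
  intro lst n _ hpre hnd
  unfold perform_partial_sort perform_partial_sort_alt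
  by_cases hn1 : n ≤ 1
  · rw [PySem.List.pyRange_one_eq_nil (by omega)]
    simp only [List.foldl_nil]
    refine (PySem.List.sorted_eq_self_of_pairwise _ (fun x => x) ?_).symm
    by_cases hn0 : 0 ≤ n
    · rw [PySem.List.slice_to _ hn0]
      exact pairwise_of_short _ (by simp; omega)
    · have hneg : n < 0 := by omega
      have hk : 0 < (-n).toNat := by omega
      have hnn : -(((-n).toNat : Int)) = n := by omega
      rw [← hnn, PySem.List.slice_to_neg_natCast _ _ hk]
      unfold D_perform_partial_sort at hnd
      rw [not_and, not_not] at hnd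
      simpa using hnd hneg
  · have hn2 : 2 ≤ n := by omega
    have hnl : n ≤ (lst.length : Int) := by
      rcases hpre with h | h
      · exact h
      · omega
    match lst, hnl with
    | [], hnl => simp at hnl; omega
    | h0 :: t, hnl =>
      have hk : ((n - 1).toNat : Int) = n - 1 := by omega
      have hkt : (n - 1).toNat ≤ t.length := by
        simp at hnl; omega
      have h1 : (([h0] : List Int).length : Int) = 1 := by simp
      have hr : (PySem.List.pyRange 1 n 1)
          = PySem.List.pyRange (([h0] : List Int).length : Int)
              ((([h0] : List Int).length : Int) + (n - 1).toNat) 1 := by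
        rw [h1]
        congr 1
        omega
      have hfold := foldl_pssStep (n - 1).toNat [h0] t hkt
      rw [hr]
      have hsplit : (h0 :: t : List Int) = [h0] ++ t := by simp
      rw [hsplit, hfold]
      set I := (t.take (n - 1).toNat).foldl (fun p v => pyIns v p) [h0] with hI
      have hIlen : I.length = n.toNat := by
        rw [hI, length_foldl_pyIns]
        simp
        omega
      have hslice1 : PySem.List.slice (I ++ t.drop (n - 1).toNat) none (some n)
          = I := by
        rw [PySem.List.slice_to _ (by omega)]
        rw [List.take_append_of_le_length (by omega), List.take_of_length_le (by omega)]
      rw [hslice1]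
      have hslice2 : PySem.List.slice ([h0] ++ t) none (some n) = h0 :: t.take (n - 1).toNat := by
        rw [PySem.List.slice_to _ (by omega)]
        have : n.toNat = 1 + (n - 1).toNat := by omega
        rw [this]
        simp [List.take_add]
      rw [hslice2]
      refine (PySem.List.sorted_id_eq_of_perm_of_pairwise _ _ ?_ ?_).symm
      · refine (foldl_pyIns_perm _ _).trans ?_
        simp
      · simpa using foldl_pyIns_pairwise _ _ (by simp)

theorem perform_partial_sort_changed : Claim_changed_perform_partial_sort := by
  unfold Claim_changed_perform_partial_sort; decide

theorem perform_partial_sort_tight : Claim_exact_perform_partial_sort := by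
  intro lst n _ _ hd heq
  rcases hd with ⟨hneg, hns⟩
  have hk : 0 < (-n).toNat := by omega
  have hnn : -(((-n).toNat : Int)) = n := by omega
  have hsl : PySem.List.slice lst none (some n) = lst.take (lst.length - (-n).toNat) := by
    conv_lhs => rw [← hnn]
    rw [PySem.List.slice_to_neg_natCast _ _ hk]
  have hA : perform_partial_sort lst n = lst.take (lst.length - (-n).toNat) := by
    unfold perform_partial_sort
    rw [PySem.List.pyRange_one_eq_nil (by omega)]
    simp only [List.foldl_nil]
    exact hsl
  have hB : perform_partial_sort_alt lst n
      = PySem.List.sorted (lst.take (lst.length - (-n).toNat)) (fun x => x) false := by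
    unfold perform_partial_sort_alt
    rw [hsl]
  rw [hA, hB] at heq
  exact hns (by rw [heq]; exact PySem.List.sorted_pairwise _ _)
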